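-- pv_equiv track=rewrite | github.com/adarsh2707/student-patent-novelty-check | Backend/cpc_mapper.py | _cpc_match_type
-- ===== SOURCE A (Python) =====
-- from typing import List, Optional
--
-- def _cpc_match_type(idea_cpcs: List[str], patent_cpc: str) -> str:
--     patent_cpc = (patent_cpc or "").strip().upper()
--     cleaned = [(x or "").strip().upper() for x in (idea_cpcs or []) if (x or "").strip()]
--     if not patent_cpc or not cleaned:
--         return "general"
--
--     for target in cleaned:
--         if patent_cpc == target:
--             return "exact"
--         if patent_cpc.startswith(target) or target.startswith(patent_cpc):
--             return "descendant"
--         if len(patent_cpc) >= 4 and len(target) >= 4 and patent_cpc[:4] == target[:4]: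
--             return "subclass"
--         if len(patent_cpc) >= 3 and len(target) >= 3 and patent_cpc[:3] == target[:3]:
--             return "class"
--         if patent_cpc[:1] == target[:1]:
--             return "section"
--
--     return "general"
-- ===== SOURCE B (Python) =====
-- from typing import List
--
-- def _cpc_match_type(idea_cpcs: List[str], patent_cpc: str) -> str:
--     p = (patent_cpc or "").strip().upper()
--     cleaned = [t for t in ((x or "").strip().upper() for x in (idea_cpcs or [])) if t]
--     if not p or not cleaned:
--         return "general"
--     for t in cleaned:
--         # common-prefix length
--         k = 0
--         m = min(len(p), len(t))
--         while k < m and p[k] == t[k]: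
--             k += 1
--         if k == m:
--             return "exact" if len(p) == len(t) else "descendant"
--         if k >= 4:
--             return "subclass"
--         if k >= 3:
--             return "class"
--         if k >= 1:
--             return "section"
--     return "general"
-- ===== Notes on version B (the rewrite author's own statement) =====
-- stated objective: alternative
-- what changed: Replaces the five independent string comparisons (equality, two-way startswith, 4/3/1-character slice comparisons) per target by one computation of the common-prefix length k, from which the category is read off (k==min => exact/descendant, k>=4/3/1 => subclass/class/section).
import Mathlib
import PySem

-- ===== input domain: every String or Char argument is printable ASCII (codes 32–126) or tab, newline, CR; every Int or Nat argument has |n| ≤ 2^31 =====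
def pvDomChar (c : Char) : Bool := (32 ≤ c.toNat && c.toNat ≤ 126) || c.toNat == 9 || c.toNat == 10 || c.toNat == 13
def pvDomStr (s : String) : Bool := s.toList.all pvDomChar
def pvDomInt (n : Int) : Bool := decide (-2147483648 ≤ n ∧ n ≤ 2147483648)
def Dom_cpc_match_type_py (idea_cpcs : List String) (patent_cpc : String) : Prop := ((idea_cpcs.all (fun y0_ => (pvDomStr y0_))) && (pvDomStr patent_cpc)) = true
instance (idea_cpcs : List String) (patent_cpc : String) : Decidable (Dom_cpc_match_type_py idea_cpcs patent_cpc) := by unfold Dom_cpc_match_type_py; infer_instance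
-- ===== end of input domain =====

-- B classifies each target from one common-prefix-length computation instead of A's five
-- separate string comparisons; same first-match-wins loop, 'alternative' objective.

-- ===== PORT A =====
-- the for-loop of A over the cleaned targets, branch for branch
def pvLoopA (p : String) : List String → String
  | [] => "general"
  | t :: ts =>
    if p = t then "exact"
    else if PySem.Str.startswith p t || PySem.Str.startswith t p then "descendant"
    else if 4 ≤ PySem.Str.len p ∧ 4 ≤ PySem.Str.len t ∧
            PySem.Str.slice p none (some 4) = PySem.Str.slice t none (some 4) then "subclass"
    else if 3 ≤ PySem.Str.len p ∧ 3 ≤ PySem.Str.len t ∧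
            PySem.Str.slice p none (some 3) = PySem.Str.slice t none (some 3) then "class"
    else if PySem.Str.slice p none (some 1) = PySem.Str.slice t none (some 1) then "section"
    else pvLoopA p ts

def cpc_match_type_py (idea_cpcs : List String) (patent_cpc : String) : String :=
  let p := PySem.Str.upper (PySem.Str.strip patent_cpc)
  let cleaned := (idea_cpcs.filter (fun x => PySem.Str.strip x ≠ "")).map
      (fun x => PySem.Str.upper (PySem.Str.strip x))
  if p = "" ∨ cleaned = [] then "general"
  else pvLoopA p cleaned

-- ===== PORT B =====
-- common-prefix length of two character lists (Source B's while-loop)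
def pvCpl : List Char → List Char → Nat
  | a :: as, b :: bs => if a = b then pvCpl as bs + 1 else 0
  | _, _ => 0

def pvLoopB (p : List Char) : List (List Char) → String
  | [] => "general"
  | t :: ts =>
    let k := pvCpl p t
    if k = min p.length t.length then (if p.length = t.length then "exact" else "descendant")
    else if 4 ≤ k then "subclass"
    else if 3 ≤ k then "class"
    else if 1 ≤ k then "section"
    else pvLoopB p ts

def cpc_match_type_py_alt (idea_cpcs : List String) (patent_cpc : String) : String :=
  let p := (PySem.Str.upper (PySem.Str.strip patent_cpc)).toList
  let cleaned := (idea_cpcs.map (fun x => (PySem.Str.upper (PySem.Str.strip x)).toList)).filter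
      (fun t => ¬ t = [])
  if p = [] ∨ cleaned = [] then "general"
  else pvLoopB p cleaned

-- ===== PRECONDITION & SPEC =====
def Spec_cpc_match_type_py (idea_cpcs : List String) (patent_cpc : String) (out : String) : Prop := out = cpc_match_type_py_alt idea_cpcs patent_cpc
instance (idea_cpcs : List String) (patent_cpc : String) (out : String) : Decidable (Spec_cpc_match_type_py idea_cpcs patent_cpc out) := by unfold Spec_cpc_match_type_py; infer_instance

-- ===== CLAIM (what is proved, stated in full; the proofs are below) =====
def Claim_equal_cpc_match_type_py : Prop := ∀ (idea_cpcs : List String) (patent_cpc : String), Dom_cpc_match_type_py idea_cpcs patent_cpc → Spec_cpc_match_type_py idea_cpcs patent_cpc (cpc_match_type_py idea_cpcs patent_cpc)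

-- ===== LEMMAS AND PROOFS =====

theorem pvCpl_le_min (as bs : List Char) : pvCpl as bs ≤ min as.length bs.length := by
  induction as generalizing bs with
  | nil => simp [pvCpl]
  | cons a as ih =>
    cases bs with
    | nil => simp [pvCpl]
    | cons b bs =>
      have h2 := ih bs
      by_cases h : a = b <;> simp [pvCpl, h] <;> omega

-- cpl ≥ n ↔ the first n characters agree (given both long enough)
theorem pvCpl_ge_iff (as bs : List Char) (n : Nat) (ha : n ≤ as.length) (hb : n ≤ bs.length) :
    n ≤ pvCpl as bs ↔ as.take n = bs.take n := by
  induction n generalizing as bs with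
  | zero => simp
  | succ n ih =>
    cases as with
    | nil => simp at ha
    | cons a as =>
      cases bs with
      | nil => simp at hb
      | cons b bs =>
        simp only [List.length_cons] at ha hb
        by_cases h : a = b
        · subst h
          simp [pvCpl, List.take_succ_cons, ih as bs (by omega) (by omega)]
        · simp [pvCpl, h]

theorem pvCpl_eq_min_iff (as bs : List Char) :
    pvCpl as bs = min as.length bs.length ↔ as <+: bs ∨ bs <+: as := by
  constructor
  · intro h
    rcases Nat.le_total as.length bs.length with hle | hle
    · left
      have : as.take as.length = bs.take as.length := by
        rw [← pvCpl_ge_iff as bs as.length (le_refl _) hle]; omega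
      rw [List.take_length] at this
      exact this ▸ List.take_prefix _ _
    · right
      have : as.take bs.length = bs.take bs.length := by
        rw [← pvCpl_ge_iff as bs bs.length hle (le_refl _)]; omega
      rw [List.take_length] at this
      exact this ▸ (List.take_prefix _ _)
  · intro h
    rcases h with h | h
    · have hl : as.length ≤ bs.length := h.length_le
      have : as.take as.length = bs.take as.length := by
        rw [List.take_length]; exact (List.prefix_iff_eq_take.mp h) ▸ rfl
      have := (pvCpl_ge_iff as bs as.length (le_refl _) hl).mpr this
      have := pvCpl_le_min as bs
      omega
    · have hl : bs.length ≤ as.length := h.length_le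
      have : as.take bs.length = bs.take bs.length := by
        rw [List.take_length]; exact (List.prefix_iff_eq_take.mp h).symm
      have := (pvCpl_ge_iff as bs bs.length hl (le_refl _)).mpr this
      have := pvCpl_le_min as bs
      omega

-- the per-target conditions of A, read off the common-prefix length
theorem pvCond_iff (P T : List Char) (m : Nat) :
    (m ≤ P.length ∧ m ≤ T.length ∧ P.take m = T.take m) ↔ m ≤ pvCpl P T := by
  constructor
  · rintro ⟨ha, hb, hs⟩; exact (pvCpl_ge_iff P T m ha hb).mpr hs
  · intro h
    have hle := pvCpl_le_min P T
    exact ⟨by omega, by omega, (pvCpl_ge_iff P T m (by omega) (by omega)).mp h⟩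

theorem pvLoop_eq (p : String) (ts : List String)
    (hp : p.toList ≠ []) (hts : ∀ t ∈ ts, t.toList ≠ []) :
    pvLoopA p ts = pvLoopB p.toList (ts.map String.toList) := by
  induction ts with
  | nil => rfl
  | cons t ts ih =>
    have ht : t.toList ≠ [] := hts t (List.mem_cons_self)
    have ih' := ih (fun u hu => hts u (List.mem_cons_of_mem _ hu))
    have hp1 : 1 ≤ p.toList.length := List.length_pos_iff.mpr hp
    have ht1 : 1 ≤ t.toList.length := List.length_pos_iff.mpr ht
    have hle := pvCpl_le_min p.toList t.toList
    have hlenp : PySem.Str.len p = p.toList.length := by simp [pysem]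
    have hlent : PySem.Str.len t = t.toList.length := by simp [pysem]
    have hsl : ∀ (s : String) (m : Nat), (PySem.Str.slice s none (some (m : Int))).toList
        = s.toList.take m := by
      intro s m
      rw [PySem.Str.toList_slice, PySem.Chars.slice_eq_listSlice, PySem.List.slice_to_natCast]
    have h4 : (4 ≤ PySem.Str.len p ∧ 4 ≤ PySem.Str.len t ∧
        PySem.Str.slice p none (some 4) = PySem.Str.slice t none (some 4))
        ↔ 4 ≤ pvCpl p.toList t.toList := by
      rw [← pvCond_iff p.toList t.toList 4, hlenp, hlent, ← String.toList_inj,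
        show ((4 : Int) = ((4 : Nat) : Int)) from rfl, hsl, hsl]
      norm_cast
    have h3 : (3 ≤ PySem.Str.len p ∧ 3 ≤ PySem.Str.len t ∧
        PySem.Str.slice p none (some 3) = PySem.Str.slice t none (some 3))
        ↔ 3 ≤ pvCpl p.toList t.toList := by
      rw [← pvCond_iff p.toList t.toList 3, hlenp, hlent, ← String.toList_inj,
        show ((3 : Int) = ((3 : Nat) : Int)) from rfl, hsl, hsl]
      norm_cast
    have h1 : (PySem.Str.slice p none (some 1) = PySem.Str.slice t none (some 1))
        ↔ 1 ≤ pvCpl p.toList t.toList := by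
      rw [← String.toList_inj, show ((1 : Int) = ((1 : Nat) : Int)) from rfl, hsl, hsl]
      rw [← pvCond_iff p.toList t.toList 1]
      constructor
      · intro h; exact ⟨hp1, ht1, h⟩
      · exact fun h => h.2.2
    have hsw : (PySem.Str.startswith p t || PySem.Str.startswith t p) = true
        ↔ pvCpl p.toList t.toList = min p.toList.length t.toList.length := by
      rw [pvCpl_eq_min_iff, Bool.or_eq_true]
      simp only [PySem.Str.startswith_eq, PySem.Chars.startswith_iff]
      exact or_comm
    have heq : p = t ↔ (pvCpl p.toList t.toList = min p.toList.length t.toList.length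
        ∧ p.toList.length = t.toList.length) := by
      constructor
      · intro h
        subst h
        exact ⟨(pvCpl_eq_min_iff _ _).mpr (Or.inl (List.prefix_refl _)), rfl⟩
      · rintro ⟨hm, hl⟩
        apply String.toList_inj.mp
        rcases (pvCpl_eq_min_iff _ _).mp hm with h | h
        · exact h.eq_of_length hl
        · exact (h.eq_of_length hl.symm).symm
    rw [List.map_cons, pvLoopA, pvLoopB]
    by_cases hmin : pvCpl p.toList t.toList = min p.toList.length t.toList.length
    · by_cases hlen : p.toList.length = t.toList.length
      · rw [if_pos (heq.mpr ⟨hmin, hlen⟩)]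
        simp [hmin, hlen]
      · have hne : ¬ p = t := fun h => hlen (heq.mp h).2
        rw [if_neg hne, if_pos (hsw.mpr hmin)]
        have hlen' : ¬ p.length = t.length := by simpa using hlen
        simp [hmin, hlen']
    · have hne : ¬ p = t := fun h => hmin (heq.mp h).1
      rw [if_neg hne, if_neg (fun h => hmin (hsw.mp h))]
      rw [if_neg hmin]
      by_cases hc4 : 4 ≤ pvCpl p.toList t.toList
      · rw [if_pos (h4.mpr hc4), if_pos hc4]
      · rw [if_neg (fun h => hc4 (h4.mp h)), if_neg hc4]
        by_cases hc3 : 3 ≤ pvCpl p.toList t.toList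
        · rw [if_pos (h3.mpr hc3), if_pos hc3]
        · rw [if_neg (fun h => hc3 (h3.mp h)), if_neg hc3]
          by_cases hc1 : 1 ≤ pvCpl p.toList t.toList
          · rw [if_pos (h1.mpr hc1), if_pos hc1]
          · rw [if_neg (fun h => hc1 (h1.mp h)), if_neg hc1]
            exact ih'

theorem pvUpper_toList_nil (s : String) : (PySem.Str.upper s).toList = [] ↔ s.toList = [] := by
  rw [PySem.Str.toList_upper]
  simp [PySem.Chars.upper]

theorem pvFil (x : String) :
    (decide (¬ (PySem.Str.upper (PySem.Str.strip x)).toList = []))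
    = (decide (¬ PySem.Str.strip x = "")) := by
  rw [decide_eq_decide, not_iff_not, ← String.toList_eq_nil_iff]
  exact pvUpper_toList_nil _

theorem pvClean_eq (l : List String) :
    ((l.map (fun x => (PySem.Str.upper (PySem.Str.strip x)).toList)).filter
      (fun t => ¬ t = []))
    = ((l.filter (fun x => PySem.Str.strip x ≠ "")).map
      (fun x => PySem.Str.upper (PySem.Str.strip x))).map String.toList := by
  induction l with
  | nil => rfl
  | cons x xs ih =>
    rw [List.map_cons, List.filter_cons, List.filter_cons, pvFil x]
    cases hdx : (decide (¬ PySem.Str.strip x = "")) with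
    | true => rw [if_pos rfl, if_pos rfl, List.map_cons, List.map_cons, ih]
    | false =>
      rw [if_neg Bool.false_ne_true, if_neg Bool.false_ne_true, ih]

set_option maxHeartbeats 1000000 in
theorem cpc_match_type_py_spec : Claim_equal_cpc_match_type_py := by
  intro idea_cpcs patent_cpc _
  unfold Spec_cpc_match_type_py
  rw [cpc_match_type_py, cpc_match_type_py_alt]
  by_cases hp : PySem.Str.upper (PySem.Str.strip patent_cpc) = ""
  · have hpB : (PySem.Str.upper (PySem.Str.strip patent_cpc)).toList = [] :=
      String.toList_eq_nil_iff.mpr hp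
    have hA : PySem.Str.upper (PySem.Str.strip patent_cpc) = "" ∨
        ((idea_cpcs.filter (fun x => PySem.Str.strip x ≠ "")).map
          (fun x => PySem.Str.upper (PySem.Str.strip x))) = [] := Or.inl hp
    have hB : (PySem.Str.upper (PySem.Str.strip patent_cpc)).toList = [] ∨
        ((idea_cpcs.map (fun x => (PySem.Str.upper (PySem.Str.strip x)).toList)).filter
          (fun t => ¬ t = [])) = [] := Or.inl hpB
    rw [if_pos hA, if_pos hB]
  · by_cases hc : (idea_cpcs.filter (fun x => PySem.Str.strip x ≠ "")).map
        (fun x => PySem.Str.upper (PySem.Str.strip x)) = []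
    · have hcb : ((idea_cpcs.map (fun x => (PySem.Str.upper (PySem.Str.strip x)).toList)).filter
          (fun t => ¬ t = [])) = [] := by rw [pvClean_eq, hc]; rfl
      have hA : PySem.Str.upper (PySem.Str.strip patent_cpc) = "" ∨
          ((idea_cpcs.filter (fun x => PySem.Str.strip x ≠ "")).map
            (fun x => PySem.Str.upper (PySem.Str.strip x))) = [] := Or.inr hc
      have hB : (PySem.Str.upper (PySem.Str.strip patent_cpc)).toList = [] ∨
          ((idea_cpcs.map (fun x => (PySem.Str.upper (PySem.Str.strip x)).toList)).filter
            (fun t => ¬ t = [])) = [] := Or.inr hcb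
      rw [if_pos hA, if_pos hB]
    · have hcb : ¬ ((idea_cpcs.map (fun x => (PySem.Str.upper (PySem.Str.strip x)).toList)).filter
          (fun t => ¬ t = [])) = [] := by
        rw [pvClean_eq]
        exact fun h => hc (List.map_eq_nil_iff.mp h)
      have hpB : ¬ (PySem.Str.upper (PySem.Str.strip patent_cpc)).toList = [] :=
        fun h => hp (String.toList_eq_nil_iff.mp h)
      have hA : ¬ (PySem.Str.upper (PySem.Str.strip patent_cpc) = "" ∨
          ((idea_cpcs.filter (fun x => PySem.Str.strip x ≠ "")).map
            (fun x => PySem.Str.upper (PySem.Str.strip x))) = []) := fun h => h.elim hp hc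
      have hB : ¬ ((PySem.Str.upper (PySem.Str.strip patent_cpc)).toList = [] ∨
          ((idea_cpcs.map (fun x => (PySem.Str.upper (PySem.Str.strip x)).toList)).filter
            (fun t => ¬ t = [])) = []) := fun h => h.elim hpB hcb
      rw [if_neg hA, if_neg hB, pvClean_eq]
      apply pvLoop_eq
      · exact hpB
      · intro u hu
        simp only [List.mem_map, List.mem_filter] at hu
        obtain ⟨x, ⟨-, hx⟩, rfl⟩ := hu
        intro hnil
        exact (by simpa using hx : ¬ PySem.Str.strip x = "")
          (String.toList_eq_nil_iff.mp ((pvUpper_toList_nil _).mp hnil))
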